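-- pv_equiv track=rewrite | github.com/explosion204/yandex-contest-bsuir-aisd | 15.py | get_operations_count
-- ===== SOURCE A (Python) =====
-- def get_operations_count(seq):
--     operations_count = 0
--     max_value = seq[0]
--
--     for i in range(1, len(seq)):
--         if seq[i] > max_value:
--             operations_count += seq[i] - max_value
--             max_value = seq[i]
--
--         elif seq[i] < seq[i - 1]:
--             operations_count += seq[i - 1] - seq[i]
--
--         seq[i - 1] = seq[i]
--
--     return operations_count
-- ===== SOURCE B (Python) =====
-- def get_operations_count(seq):
--     # Telescoped form: the running-max increments sum to max(seq) minus the first element;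
--     # only the downward drops need a loop. Same in-place shift mutation as A.
--     first = seq[0]
--     peak = max(seq)
--     drops = 0
--     for i in range(1, len(seq)):
--         if seq[i] < seq[i - 1]:
--             drops += seq[i - 1] - seq[i]
--         seq[i - 1] = seq[i]
--     return peak - first + drops
-- ===== Notes on version B (the rewrite author's own statement) =====
-- stated objective: simpler
-- what changed: Replaces A's in-loop running-max tracking and increment accumulation with the closed form max(seq) minus the first element computed upfront, leaving a single loop that only accumulates downward drops.
import Mathlib
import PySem

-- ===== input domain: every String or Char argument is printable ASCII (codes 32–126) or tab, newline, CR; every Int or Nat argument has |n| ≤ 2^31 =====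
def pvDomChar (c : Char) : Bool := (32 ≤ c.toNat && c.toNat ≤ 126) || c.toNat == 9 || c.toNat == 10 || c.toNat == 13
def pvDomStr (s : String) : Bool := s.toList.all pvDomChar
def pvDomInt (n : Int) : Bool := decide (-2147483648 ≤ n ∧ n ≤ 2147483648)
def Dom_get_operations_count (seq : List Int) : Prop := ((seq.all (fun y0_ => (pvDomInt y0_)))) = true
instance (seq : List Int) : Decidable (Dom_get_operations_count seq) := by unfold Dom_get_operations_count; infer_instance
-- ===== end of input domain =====

-- B replaces A's in-loop running-max increment accumulation by the closed form
-- max(seq) minus the first element, keeping one loop that only sums downward drops (objective: simpler).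
-- Both Pythons mutate seq in place (seq[i-1] = seq[i]); the equivalence proved here is
-- about the RETURN value only (the two perform the identical mutation). The mutation
-- never affects a later read (reads are at indices ≥ every already-written index),
-- so both ports read from the original list.

-- ===== PORT A =====
def get_operations_count (seq : List Int) : Int :=
  ((PySem.List.pyRange 1 (seq.length : Int)).foldl
    (fun (s : Int × Int) i =>
      if PySem.List.pyGetD seq i 0 > s.2 then
        (s.1 + (PySem.List.pyGetD seq i 0 - s.2), PySem.List.pyGetD seq i 0)
      else if PySem.List.pyGetD seq i 0 < PySem.List.pyGetD seq (i - 1) 0 then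
        (s.1 + (PySem.List.pyGetD seq (i - 1) 0 - PySem.List.pyGetD seq i 0), s.2)
      else s)
    (0, PySem.List.pyGetD seq 0 0)).1

-- ===== PORT B =====
def get_operations_count_alt (seq : List Int) : Int :=
  let first := PySem.List.pyGetD seq 0 0
  let peak := (PySem.List.max? seq (fun y => y)).getD 0
  let drops := (PySem.List.pyRange 1 (seq.length : Int)).foldl
    (fun d i =>
      if PySem.List.pyGetD seq i 0 < PySem.List.pyGetD seq (i - 1) 0 then
        d + (PySem.List.pyGetD seq (i - 1) 0 - PySem.List.pyGetD seq i 0)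
      else d) 0
  peak - first + drops

-- ===== PRECONDITION & SPEC =====
-- Both Pythons raise on the empty list (A: IndexError reading the first element); Pre_ excludes exactly that.
def Pre_get_operations_count (seq : List Int) : Prop := seq ≠ []
instance (seq : List Int) : Decidable (Pre_get_operations_count seq) := by unfold Pre_get_operations_count; infer_instance
def pvWitness_get_operations_count : List Int := [3, 1, 4]

def Spec_get_operations_count (seq : List Int) (out : Int) : Prop := out = get_operations_count_alt seq
instance (seq : List Int) (out : Int) : Decidable (Spec_get_operations_count seq out) := by unfold Spec_get_operations_count; infer_instance

-- ===== CLAIM (what is proved, stated in full; the proofs are below) =====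
def Claim_equal_get_operations_count : Prop := ∀ (seq : List Int), Dom_get_operations_count seq → Pre_get_operations_count seq → Spec_get_operations_count seq (get_operations_count seq)

-- ===== LEMMAS AND PROOFS =====

-- The loop body of port A, with the list fixed.
def pvStepA (seq : List Int) (s : Int × Int) (i : Int) : Int × Int :=
  if PySem.List.pyGetD seq i 0 > s.2 then
    (s.1 + (PySem.List.pyGetD seq i 0 - s.2), PySem.List.pyGetD seq i 0)
  else if PySem.List.pyGetD seq i 0 < PySem.List.pyGetD seq (i - 1) 0 then
    (s.1 + (PySem.List.pyGetD seq (i - 1) 0 - PySem.List.pyGetD seq i 0), s.2)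
  else s

-- The loop body of port B, with the list fixed.
def pvStepB (seq : List Int) (d : Int) (i : Int) : Int :=
  if PySem.List.pyGetD seq i 0 < PySem.List.pyGetD seq (i - 1) 0 then
    d + (PySem.List.pyGetD seq (i - 1) 0 - PySem.List.pyGetD seq i 0)
  else d

-- Loop invariant on seq = x :: t after k iterations: A's max component is the running
-- max of the first k+1 elements, and A's counter equals (running max - x) + B's drops.
theorem pv_loop_inv (x : Int) (t : List Int) :
    ∀ (k : Nat), k ≤ t.length →
      ((PySem.List.pyRange 1 (1 + (k : Int))).foldl (pvStepA (x :: t)) (0, x)).2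
        = (t.take k).foldl max x ∧
      ((PySem.List.pyRange 1 (1 + (k : Int))).foldl (pvStepA (x :: t)) (0, x)).1
        = (t.take k).foldl max x - x
          + (PySem.List.pyRange 1 (1 + (k : Int))).foldl (pvStepB (x :: t)) 0 := by
  intro k
  induction k with
  | zero =>
    intro _
    simp
  | succ k ih =>
    intro hk
    have hk' : k ≤ t.length := by omega
    obtain ⟨ih2, ih1⟩ := ih hk'
    have hb : (1 : Int) + ((k + 1 : Nat) : Int) = (1 + (k : Int)) + 1 := by push_cast; ring
    have hsplit : PySem.List.pyRange 1 (1 + ((k + 1 : Nat) : Int))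
        = PySem.List.pyRange 1 (1 + (k : Int)) ++ [1 + (k : Int)] := by
      rw [hb, PySem.List.pyRange_one_succ_right (by omega)]
    -- the two array reads at this iteration
    have hkt : k < t.length := by omega
    have hcur : PySem.List.pyGetD (x :: t) (1 + (k : Int)) 0 = t[k]'hkt := by
      rw [PySem.List.pyGetD_eq_getElem (x :: t) 0 (by omega)
        (by simp; omega)]
      simp [show ((1 : Int) + (k : Int)).toNat = k + 1 by omega]
    have hprev : PySem.List.pyGetD (x :: t) (1 + (k : Int) - 1) 0 = (x :: t)[k]'(by simp; omega) := by
      rw [show (1 : Int) + (k : Int) - 1 = (k : Int) by ring]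
      rw [PySem.List.pyGetD_eq_getElem (x :: t) 0 (by omega) (by simp; omega)]
      simp
    -- prev element is bounded by the running max
    have hprev_le : (x :: t)[k]'(by simp; omega) ≤ (t.take k).foldl max x := by
      cases k with
      | zero => simp
      | succ k' =>
        have hmem : t[k']'(by omega) ∈ t.take (k' + 1) := by
          have h2 : k' < (t.take (k' + 1)).length := by simp; omega
          have := List.getElem_mem h2
          rwa [List.getElem_take] at this
        simpa using (PySem.List.le_foldl_max (t.take (k' + 1)) x).2 _ hmem
    -- running max extends by one element
    have htake : (t.take (k + 1)).foldl max x = max ((t.take k).foldl max x) (t[k]'hkt) := by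
      rw [List.take_succ, List.getElem?_eq_getElem hkt, Option.toList_some,
        List.foldl_append, List.foldl_cons, List.foldl_nil]
    rw [hsplit, List.foldl_append, List.foldl_append]
    simp only [List.foldl_cons, List.foldl_nil]
    constructor
    · rw [htake]
      simp only [pvStepA, hcur, hprev, ih2]
      split_ifs with h1 <;> omega
    · rw [htake]
      simp only [pvStepA, pvStepB, hcur, hprev, ih1, ih2]
      split_ifs with h1 h2 h3 <;> omega

-- max(seq) is exactly the running max A maintains.
theorem pv_peak (x : Int) (t : List Int) :
    (PySem.List.max? (x :: t) (fun y => y)).getD 0 = t.foldl max x := by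
  rw [PySem.List.max?_id_cons]
  rfl

-- ===== VERDICT (by name: the statement is the Claim_ definition above) =====
theorem get_operations_count_spec : Claim_equal_get_operations_count := by
  intro seq _ hpre
  cases seq with
  | nil => exact absurd rfl hpre
  | cons x t =>
    unfold Spec_get_operations_count get_operations_count get_operations_count_alt
    have h := pv_loop_inv x t t.length le_rfl
    rw [List.take_length] at h
    have hlen : ((x :: t).length : Int) = 1 + (t.length : Int) := by
      simp; ring
    rw [show (fun (s : Int × Int) i =>
      if PySem.List.pyGetD (x :: t) i 0 > s.2 then
        (s.1 + (PySem.List.pyGetD (x :: t) i 0 - s.2), PySem.List.pyGetD (x :: t) i 0)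
      else if PySem.List.pyGetD (x :: t) i 0 < PySem.List.pyGetD (x :: t) (i - 1) 0 then
        (s.1 + (PySem.List.pyGetD (x :: t) (i - 1) 0 - PySem.List.pyGetD (x :: t) i 0), s.2)
      else s) = pvStepA (x :: t) from rfl]
    rw [show (fun (d : Int) i =>
      if PySem.List.pyGetD (x :: t) i 0 < PySem.List.pyGetD (x :: t) (i - 1) 0 then
        d + (PySem.List.pyGetD (x :: t) (i - 1) 0 - PySem.List.pyGetD (x :: t) i 0)
      else d) = pvStepB (x :: t) from rfl]
    rw [hlen, pv_peak x t]
    have hx0 : PySem.List.pyGetD (x :: t) 0 0 = x := by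
      rw [PySem.List.pyGetD_eq_getElem (x :: t) 0 (by omega) (by simp)]; rfl
    rw [hx0]
    dsimp only
    omega
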